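-- pv_equiv track=rewrite | github.com/kota-kawa/Scheduler-Agent | scheduler_agent/services/chat_orchestration_service.py | _format_step_progress
-- ===== SOURCE A (Python) =====
-- from typing import Any, Dict, List, Union
--
-- def _format_step_progress(steps: List[Dict[str, Any]], completed_steps: int) -> str:
--     if not steps:
--         return "(none)"
--
--     lines: List[str] = []
--     next_step_label = ""
--     for idx, step in enumerate(steps, start=1):
--         done = idx <= completed_steps
--         marker = "x" if done else " "
--         label = step.get("label", step.get("id", "step"))
--         lines.append(f"- [{marker}] {idx}. {label}")
--         if not done and not next_step_label:
--             next_step_label = str(label)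
--
--     if next_step_label:
--         lines.append(f"next_expected_step: {next_step_label}")
--     else:
--         lines.append("next_expected_step: (all completed)")
--
--     return "\n".join(lines)
-- ===== SOURCE B (Python) =====
-- def _format_step_progress(steps, completed_steps):
--     if not steps:
--         return "(none)"
--
--     def go(rest, idx):
--         # returns (text of lines idx.., first truthy pending label at index >= idx)
--         if not rest:
--             return None, ""
--         head = rest[0]
--         label = head.get("label", head.get("id", "step"))
--         done = idx <= completed_steps
--         sub, nxt = go(rest[1:], idx + 1)
--         if not done and str(label):
--             nxt = str(label)
--         line = "- [%s] %d. %s" % ("x" if done else " ", idx, label)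
--         text = line if sub is None else line + "\n" + sub
--         return text, nxt
--
--     body, nxt = go(steps, 1)
--     footer = "next_expected_step: %s" % nxt if nxt else "next_expected_step: (all completed)"
--     return body + "\n" + footer
-- ===== Notes on version B (the rewrite author's own statement) =====
-- stated objective: alternative
-- what changed: Replaces A's iterative accumulator loop (a growing list of lines plus a first-pending-label flag threaded through the iterations, then a join) by structural recursion on the step list: each call builds its line, concatenates it in front of the recursively built suffix string, and overrides the next-expected label after the recursive call, so no list, no join and no flag exist.
import Mathlib
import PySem

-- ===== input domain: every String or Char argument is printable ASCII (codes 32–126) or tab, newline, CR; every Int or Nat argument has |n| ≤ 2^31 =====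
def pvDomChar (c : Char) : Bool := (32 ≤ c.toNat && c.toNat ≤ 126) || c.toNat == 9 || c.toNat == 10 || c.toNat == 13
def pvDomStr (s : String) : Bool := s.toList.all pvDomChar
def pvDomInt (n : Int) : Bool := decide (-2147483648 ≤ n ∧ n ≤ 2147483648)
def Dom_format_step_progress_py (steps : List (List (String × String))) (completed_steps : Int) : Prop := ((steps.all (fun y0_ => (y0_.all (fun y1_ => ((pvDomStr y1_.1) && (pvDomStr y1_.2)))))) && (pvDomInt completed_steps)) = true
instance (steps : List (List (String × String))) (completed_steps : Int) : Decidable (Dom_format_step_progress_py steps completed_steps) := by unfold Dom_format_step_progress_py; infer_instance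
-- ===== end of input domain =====

-- B replaces A's accumulator loop + join by structural recursion building the string back-to-front; return-value equivalence only.


-- ===== PORT A =====
-- Python dict.get on an association list (first match wins), the dict.get primitive for this file's dict type
def pvDictGet (d : List (String × String)) (k : String) (dflt : String) : String :=
  match d.find? (fun p => p.1 == k) with
  | some p => p.2
  | none => dflt

def format_step_progress_py (steps : List (List (String × String))) (completed_steps : Int) : String :=
  if steps = [] then "(none)"
  else
    let st :=
      (PySem.List.enumerate steps 1).foldl
        (fun (acc : List String × String) p =>
          let idx := p.1
          let step := p.2
          let done : Bool := decide (idx ≤ completed_steps)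
          let marker := if done then "x" else " "
          let label := pvDictGet step "label" (pvDictGet step "id" "step")
          let lines := acc.1 ++ ["- [" ++ marker ++ "] " ++ PySem.Int.toStr idx ++ ". " ++ label]
          let nsl := if (!done) && (acc.2 == "") then label else acc.2
          (lines, nsl))
        ([], "")
    let lines :=
      if st.2 ≠ "" then st.1 ++ ["next_expected_step: " ++ st.2]
      else st.1 ++ ["next_expected_step: (all completed)"]
    PySem.Str.join "\n" lines

-- ===== PORT B =====
-- the inner recursive helper go(rest, idx): (text of the lines from idx on (none for []), first truthy pending label)
def pvGoB (c : Int) : List (List (String × String)) → Int → Option String × String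
  | [], _ => (none, "")
  | head :: rest, idx =>
    let label := pvDictGet head "label" (pvDictGet head "id" "step")
    let done : Bool := decide (idx ≤ c)
    let p := pvGoB c rest (idx + 1)
    let nxt := if (!done) && (label != "") then label else p.2
    let line := "- [" ++ (if done then "x" else " ") ++ "] " ++ PySem.Int.toStr idx ++ ". " ++ label
    let text := match p.1 with
      | none => line
      | some s => line ++ "\n" ++ s
    (some text, nxt)

def format_step_progress_py_alt (steps : List (List (String × String))) (completed_steps : Int) : String :=
  if steps = [] then "(none)"
  else
    let st := pvGoB completed_steps steps 1
    let body := st.1.getD ""   -- go never returns None for the nonempty steps reaching here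
    let footer :=
      if st.2 ≠ "" then "next_expected_step: " ++ st.2
      else "next_expected_step: (all completed)"
    body ++ "\n" ++ footer

-- ===== PRECONDITION & SPEC =====
def Spec_format_step_progress_py (steps : List (List (String × String))) (completed_steps : Int) (out : String) : Prop := out = format_step_progress_py_alt steps completed_steps
instance (steps : List (List (String × String))) (completed_steps : Int) (out : String) : Decidable (Spec_format_step_progress_py steps completed_steps out) := by unfold Spec_format_step_progress_py; infer_instance

-- ===== CLAIM (what is proved, stated in full; the proofs are below) =====
def Claim_equal_format_step_progress_py : Prop := ∀ (steps : List (List (String × String))) (completed_steps : Int), Dom_format_step_progress_py steps completed_steps → Spec_format_step_progress_py steps completed_steps (format_step_progress_py steps completed_steps)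

-- ===== LEMMAS AND PROOFS =====

-- abbreviations used only by the proofs
def pvLabel (s : List (String × String)) : String :=
  pvDictGet s "label" (pvDictGet s "id" "step")

def pvLineA (c : Int) (p : Int × List (String × String)) : String :=
  "- [" ++ (if decide (p.1 ≤ c) then "x" else " ") ++ "] " ++ PySem.Int.toStr p.1 ++ ". " ++ pvLabel p.2

def pvStepA (c : Int) (acc : List String × String) (p : Int × List (String × String)) :
    List String × String :=
  (acc.1 ++ [pvLineA c p],
   if (!(decide (p.1 ≤ c))) && (acc.2 == "") then pvLabel p.2 else acc.2)

def pvFirst : List String → String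
  | [] => ""
  | l :: ls => if l ≠ "" then l else pvFirst ls

def pvPend (c : Int) (steps : List (List (String × String))) (s : Int) : List String :=
  ((PySem.List.enumerate steps s).filterMap
    (fun p => if decide (p.1 ≤ c) then none else some p.2)).map pvLabel

theorem pvFoldA_eq (c : Int) (steps : List (List (String × String))) :
    ∀ (s : Int) (L : List String) (n : String),
      (PySem.List.enumerate steps s).foldl (pvStepA c) (L, n) =
        (L ++ (PySem.List.enumerate steps s).map (pvLineA c),
         if n = "" then pvFirst (pvPend c steps s) else n) := by
  induction steps with
  | nil => intro s L n; simp [PySem.List.enumerate_nil, pvFirst, pvPend]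
  | cons st rest ih =>
    intro s L n
    rw [PySem.List.enumerate_cons]
    simp only [List.foldl_cons, List.map_cons, pvPend, PySem.List.enumerate_cons,
      List.filterMap_cons]
    rw [show pvStepA c (L, n) (s, st) =
          (L ++ [pvLineA c (s, st)],
           if (!(decide (s ≤ c))) && (n == "") then pvLabel st else n) from rfl]
    rw [ih (s + 1)]
    by_cases hsc : s ≤ c
    · simp [hsc, pvPend]
    · simp only [hsc, decide_false, Bool.not_false, Bool.true_and]
      by_cases hn : n = ""
      · subst hn
        simp only [beq_self_eq_true, if_pos]
        by_cases hl : pvLabel st = ""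
        · simp [hl, pvFirst, pvPend]
        · simp [hl, pvFirst]
      · simp [hn, beq_eq_false_iff_ne.mpr hn]

theorem pvGoB_snd (c : Int) (steps : List (List (String × String))) :
    ∀ (s : Int), (pvGoB c steps s).2 = pvFirst (pvPend c steps s) := by
  induction steps with
  | nil => intro s; simp [pvGoB, pvPend, PySem.List.enumerate_nil, pvFirst]
  | cons st rest ih =>
    intro s
    simp only [pvGoB, pvPend, PySem.List.enumerate_cons, List.filterMap_cons]
    have ih' := ih (s + 1)
    simp only [pvPend] at ih'
    by_cases hsc : s ≤ c
    · simp [hsc, ih']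
    · by_cases hl : pvDictGet st "label" (pvDictGet st "id" "step") = ""
      · simp [hsc, hl, pvLabel, pvFirst, ih']
      · simp [hsc, hl, pvLabel, pvFirst, bne_iff_ne.mpr hl]

theorem pvJoin_cons (x : String) (L : List String) (h : L ≠ []) :
    PySem.Str.join "\n" (x :: L) = x ++ "\n" ++ PySem.Str.join "\n" L := by
  cases L with
  | nil => simp at h
  | cons y ys =>
    apply String.toList_injective
    simp [PySem.Str.join, PySem.Chars.join, List.intercalate]

theorem pvJoin_singleton (x : String) : PySem.Str.join "\n" [x] = x := by
  apply String.toList_injective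
  simp [PySem.Str.join, PySem.Chars.join, List.intercalate]

theorem pvGoB_fst (c : Int) (steps : List (List (String × String))) :
    ∀ (s : Int), steps ≠ [] →
      (pvGoB c steps s).1 =
        some (PySem.Str.join "\n" ((PySem.List.enumerate steps s).map (pvLineA c))) := by
  induction steps with
  | nil => intro s h; simp at h
  | cons st rest ih =>
    intro s _
    cases rest with
    | nil =>
      simp [pvGoB, PySem.List.enumerate_cons, PySem.List.enumerate_nil,
        pvJoin_singleton, pvLineA, pvLabel]
    | cons st2 rest2 =>
      have h2 := ih (s + 1) (by simp)
      have hmapne :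
          (PySem.List.enumerate (st2 :: rest2) (s + 1)).map (pvLineA c) ≠ [] := by
        simp [PySem.List.enumerate_cons]
      conv_lhs => rw [pvGoB]
      simp only [h2]
      conv_rhs => rw [PySem.List.enumerate_cons, List.map_cons, pvJoin_cons _ _ hmapne]
      rfl

theorem pvJoin_append_singleton (L : List String) (t : String) (h : L ≠ []) :
    PySem.Str.join "\n" (L ++ [t]) = PySem.Str.join "\n" L ++ "\n" ++ t := by
  induction L with
  | nil => simp at h
  | cons x xs ih =>
    cases xs with
    | nil => simp [pvJoin_cons x [t] (by simp), pvJoin_singleton]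
    | cons y ys =>
      have hne : (y :: ys : List String) ≠ [] := by simp
      have hne2 : (y :: ys) ++ [t] ≠ [] := by simp
      rw [List.cons_append, pvJoin_cons x ((y :: ys) ++ [t]) hne2, ih hne,
        pvJoin_cons x (y :: ys) hne]
      simp [String.append_assoc]

-- ===== VERDICT (by name: the statement is the Claim_ definition above) =====
theorem format_step_progress_py_spec : Claim_equal_format_step_progress_py := by
  intro steps c _
  unfold Spec_format_step_progress_py format_step_progress_py format_step_progress_py_alt
  by_cases hs : steps = []
  · simp [hs]
  · simp only [hs, if_false]
    have hfold :
        (PySem.List.enumerate steps 1).foldl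
          (fun (acc : List String × String) p =>
            let idx := p.1
            let step := p.2
            let done : Bool := decide (idx ≤ c)
            let marker := if done then "x" else " "
            let label := pvDictGet step "label" (pvDictGet step "id" "step")
            let lines := acc.1 ++ ["- [" ++ marker ++ "] " ++ PySem.Int.toStr idx ++ ". " ++ label]
            let nsl := if (!done) && (acc.2 == "") then label else acc.2
            (lines, nsl)) ([], "") =
        (PySem.List.enumerate steps 1).foldl (pvStepA c) ([], "") := rfl
    rw [hfold, pvFoldA_eq c steps 1 [] ""]
    have hmapne : (PySem.List.enumerate steps 1).map (pvLineA c) ≠ [] := by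
      cases steps with
      | nil => exact absurd rfl hs
      | cons a b => simp [PySem.List.enumerate_cons]
    simp only [pvGoB_fst c steps 1 hs, pvGoB_snd c steps 1, List.nil_append,
      Option.getD_some]
    by_cases hX : pvFirst (pvPend c steps 1) = ""
    · simp [hX, pvJoin_append_singleton _ _ hmapne]
    · simp [hX, pvJoin_append_singleton _ _ hmapne]
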